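-- pv_equiv track=rewrite | github.com/proman3419/AGH-WIET-INF-ASD-2021 | 4/find_min_range_colors.py | find_min_range_colors
-- ===== SOURCE A (Python) =====
-- def find_min_range_colors(A, k):
--   n = len(A)
--   occurances = [0]*k
--
--   for i in range(n):
--     occurances[A[i]] += 1
--
--   i = 0
--   j = len(A) - 1
--   while i < j:
--     changed = False
--     while i < j and occurances[A[i]] - 1 > 0:
--       occurances[A[i]] -= 1
--       i += 1
--       changed = True
--
--     while i < j and occurances[A[j]] - 1 > 0:
--       occurances[A[j]] -= 1
--       j -= 1
--       changed = True
--
--     if not changed: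
--       break
--
--   return (i, j)
-- ===== SOURCE B (Python) =====
-- def find_min_range_colors(A, k):
--     n = len(A)
--     if n == 0:
--         return (0, n - 1)
--     # last[c] = highest index whose element selects cell c
--     last = [-1] * k
--     for idx in range(n):
--         last[A[idx]] = idx
--     # i = leftmost index that is the last occurrence of its color
--     i = 0
--     while last[A[i]] != i:
--         i += 1
--     # first[c] = lowest index in [i, n) whose element selects cell c
--     first = [-1] * k
--     for idx in range(i, n):
--         if first[A[idx]] == -1:
--             first[A[idx]] = idx
--     # j = rightmost first occurrence within the suffix
--     j = i
--     for idx in range(i, n):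
--         j = max(j, first[A[idx]])
--     return (i, j)
-- ===== Notes on version B (the rewrite author's own statement) =====
-- stated objective: alternative
-- what changed: Replaces the two-pointer window-shrinking loop over a mutable count array by a direct computation: one pass builds last-occurrence positions, i is the leftmost index that is the last occurrence of its color, and j is the rightmost first-occurrence index in the suffix, computed from a first-occurrence table and a running max.
import Mathlib
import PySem

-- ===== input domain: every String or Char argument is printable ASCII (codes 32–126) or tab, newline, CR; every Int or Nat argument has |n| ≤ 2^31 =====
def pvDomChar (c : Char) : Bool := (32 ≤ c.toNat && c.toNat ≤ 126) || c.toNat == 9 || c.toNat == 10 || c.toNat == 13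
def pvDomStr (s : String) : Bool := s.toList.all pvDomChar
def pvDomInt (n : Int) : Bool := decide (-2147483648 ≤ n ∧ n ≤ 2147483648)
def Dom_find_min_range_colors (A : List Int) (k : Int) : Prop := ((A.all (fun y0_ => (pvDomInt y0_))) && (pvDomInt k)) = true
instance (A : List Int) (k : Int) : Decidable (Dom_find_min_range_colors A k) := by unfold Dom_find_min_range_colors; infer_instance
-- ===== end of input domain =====

-- B replaces A's two-pointer window-shrinking loop over a count array by a direct
-- computation from last-occurrence / first-occurrence tables and a running max (return
-- value only; A mutates no argument).

-- ===== PORT A =====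
-- while i < j and occurances[A[i]] - 1 > 0: occurances[A[i]] -= 1; i += 1
-- (fuel only makes the loop total; it is called with more fuel than the loop can use)
def pvLeftA (A : List Int) (j : Int) : Nat → Int → List Int → Int × List Int
  | 0, i, occ => (i, occ)
  | fuel + 1, i, occ =>
    if i < j ∧ PySem.List.pyGetD occ (PySem.List.pyGetD A i 0) 0 - 1 > 0 then
      pvLeftA A j fuel (i + 1)
        (PySem.List.pySetD occ (PySem.List.pyGetD A i 0)
          (PySem.List.pyGetD occ (PySem.List.pyGetD A i 0) 0 - 1))
    else (i, occ)

-- while i < j and occurances[A[j]] - 1 > 0: occurances[A[j]] -= 1; j -= 1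
def pvRightA (A : List Int) (i : Int) : Nat → Int → List Int → Int × List Int
  | 0, j, occ => (j, occ)
  | fuel + 1, j, occ =>
    if i < j ∧ PySem.List.pyGetD occ (PySem.List.pyGetD A j 0) 0 - 1 > 0 then
      pvRightA A i fuel (j - 1)
        (PySem.List.pySetD occ (PySem.List.pyGetD A j 0)
          (PySem.List.pyGetD occ (PySem.List.pyGetD A j 0) 0 - 1))
    else (j, occ)

-- while i < j: … ; if not changed: break   (changed ⟺ (i, j) moved)
def pvOuterA (A : List Int) : Nat → Int → Int → List Int → Int × Int
  | 0, i, j, _ => (i, j)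
  | fuel + 1, i, j, occ =>
    if i < j then
      if (pvLeftA A j ((j - i).toNat + 1) i occ).1 = i ∧
          (pvRightA A (pvLeftA A j ((j - i).toNat + 1) i occ).1
            ((j - (pvLeftA A j ((j - i).toNat + 1) i occ).1).toNat + 1) j
            (pvLeftA A j ((j - i).toNat + 1) i occ).2).1 = j then
        (i, j)
      else
        pvOuterA A fuel (pvLeftA A j ((j - i).toNat + 1) i occ).1
          (pvRightA A (pvLeftA A j ((j - i).toNat + 1) i occ).1
            ((j - (pvLeftA A j ((j - i).toNat + 1) i occ).1).toNat + 1) j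
            (pvLeftA A j ((j - i).toNat + 1) i occ).2).1
          (pvRightA A (pvLeftA A j ((j - i).toNat + 1) i occ).1
            ((j - (pvLeftA A j ((j - i).toNat + 1) i occ).1).toNat + 1) j
            (pvLeftA A j ((j - i).toNat + 1) i occ).2).2
    else (i, j)

def find_min_range_colors (A : List Int) (k : Int) : Int × Int :=
  let n : Int := A.length
  -- occurances = [0]*k ; for i in range(n): occurances[A[i]] += 1
  -- (the loop reads A[i] for i = 0..n-1, i.e. folds over A's elements in order)
  let occ := A.foldl
    (fun occ a => PySem.List.pySetD occ a (PySem.List.pyGetD occ a 0 + 1))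
    (List.replicate k.toNat 0)
  pvOuterA A ((n - 1).toNat + 1) 0 (n - 1) occ

-- ===== PORT B =====
-- while last[A[i]] != i: i += 1   (the i < n guard and the fuel only make the loop
-- total; under Pre_ the last index n-1 always satisfies the exit test, so neither binds)
def pvFindIB (A : List Int) (last : List Int) : Nat → Int → Int
  | 0, i => i
  | fuel + 1, i =>
    if i < (A.length : Int) ∧ PySem.List.pyGetD last (PySem.List.pyGetD A i 0) (-1) ≠ i then
      pvFindIB A last fuel (i + 1)
    else i

def find_min_range_colors_alt (A : List Int) (k : Int) : Int × Int :=
  let n : Int := A.length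
  if A.length = 0 then (0, n - 1)
  else
    -- last = [-1]*k ; for idx in range(n): last[A[idx]] = idx
    let last := (PySem.List.pyRange 0 n 1).foldl
      (fun l idx => PySem.List.pySetD l (PySem.List.pyGetD A idx 0) idx)
      (List.replicate k.toNat (-1))
    let i := pvFindIB A last (A.length + 1) 0
    -- first = [-1]*k ; for idx in range(i, n): if first[A[idx]] == -1: first[A[idx]] = idx
    let first := (PySem.List.pyRange i n 1).foldl
      (fun f idx =>
        if PySem.List.pyGetD f (PySem.List.pyGetD A idx 0) (-1) = -1 then
          PySem.List.pySetD f (PySem.List.pyGetD A idx 0) idx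
        else f)
      (List.replicate k.toNat (-1))
    -- j = i ; for idx in range(i, n): j = max(j, first[A[idx]])
    let j := (PySem.List.pyRange i n 1).foldl
      (fun j idx => max j (PySem.List.pyGetD first (PySem.List.pyGetD A idx 0) (-1))) i
    (i, j)

-- ===== PRECONDITION & SPEC =====
-- Pre_ excludes exactly the inputs where Python A raises IndexError: some element
-- outside [-k, k) used as an index into the size-k count list.
def Pre_find_min_range_colors (A : List Int) (k : Int) : Prop :=
  ∀ a ∈ A, -k ≤ a ∧ a < k
instance (A : List Int) (k : Int) : Decidable (Pre_find_min_range_colors A k) := by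
  unfold Pre_find_min_range_colors; infer_instance

def pvWitness_find_min_range_colors : List Int × Int := ([0, 1, 0, 2, 1], 3)

def Spec_find_min_range_colors (A : List Int) (k : Int) (out : Int × Int) : Prop := out = find_min_range_colors_alt A k
instance (A : List Int) (k : Int) (out : Int × Int) : Decidable (Spec_find_min_range_colors A k out) := by unfold Spec_find_min_range_colors; infer_instance

-- ===== CLAIM (what is proved, stated in full; the proofs are below) =====
def Claim_equal_find_min_range_colors : Prop := ∀ (A : List Int) (k : Int), Dom_find_min_range_colors A k → Pre_find_min_range_colors A k → Spec_find_min_range_colors A k (find_min_range_colors A k)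


-- ===== LEMMAS AND PROOFS =====

-- Python's list cell selected by index a on a list of length n (valid for -n ≤ a < n)
def pvCellN (n : Nat) (a : Int) : Nat := (if 0 ≤ a then a else a + n).toNat

-- the colors of A, normalised to the cell each element selects in a size-k list
def pvCells (A : List Int) (k : Int) : List Nat := A.map (pvCellN k.toNat)

-- the window A[i..j], as cells
def pvWin (cA : List Nat) (i j : Nat) : List Nat := (cA.drop i).take (j + 1 - i)

-- occ represents the cell counts of the window [i..j]
def pvRep (K : Nat) (cA : List Nat) (occ : List Int) (i j : Nat) : Prop :=
  occ.length = K ∧ ∀ t, t < K → occ.getD t 0 = ((pvWin cA i j).count t : Int)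

theorem pvIdx_eq (n : Nat) (a : Int) (h1 : -(n : Int) ≤ a) (h2 : a < (n : Int)) :
    PySem.List.pyIdx? n a = some (pvCellN n a) := by
  simp only [PySem.List.pyIdx?, pvCellN]
  split_ifs with h3
  · rfl
  · congr 1; omega

theorem pv_get {α : Type} (xs : List α) (a : Int) (d : α)
    (h1 : -(xs.length : Int) ≤ a) (h2 : a < (xs.length : Int)) :
    PySem.List.pyGetD xs a d = xs.getD (pvCellN xs.length a) d := by
  simp only [PySem.List.pyGetD, PySem.List.pyGet?, pvIdx_eq _ _ h1 h2, Option.bind_some]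
  rw [List.getD_eq_getElem?_getD]

theorem pv_set {α : Type} (xs : List α) (a : Int) (v : α)
    (h1 : -(xs.length : Int) ≤ a) (h2 : a < (xs.length : Int)) :
    PySem.List.pySetD xs a v = xs.set (pvCellN xs.length a) v := by
  simp [PySem.List.pySetD, PySem.List.pySet?, pvIdx_eq _ _ h1 h2]

theorem pvCellN_lt (n : Nat) (a : Int) (h1 : -(n : Int) ≤ a) (h2 : a < (n : Int)) :
    pvCellN n a < n := by
  unfold pvCellN; split_ifs <;> omega

theorem pv_getD_set (l : List Int) (m t : Nat) (v d : Int) (hm : m < l.length) :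
    (l.set m v).getD t d = if t = m then v else l.getD t d := by
  simp only [List.getD_eq_getElem?_getD, List.getElem?_set]
  by_cases h : m = t
  · subst h; simp [hm]
  · rw [if_neg h, if_neg (fun hh => h hh.symm)]

theorem pvCells_length (A : List Int) (k : Int) : (pvCells A k).length = A.length := by
  simp [pvCells]

theorem pvCells_getD (A : List Int) (k : Int) (i : Nat) (hi : i < A.length) :
    (pvCells A k).getD i 0 = pvCellN k.toNat (A.getD i 0) := by
  simp [pvCells, List.getD_eq_getElem?_getD, List.getElem?_map,
    List.getElem?_eq_getElem hi]

theorem pv_getD_mem (A : List Int) (i : Nat) (hi : i < A.length) : A.getD i 0 ∈ A := by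
  rw [List.getD_eq_getElem?_getD, List.getElem?_eq_getElem hi]
  exact List.getElem_mem hi

-- window decompositions
theorem pvWin_cons (cA : List Nat) (i j : Nat) (hij : i ≤ j) (hi : i < cA.length) :
    pvWin cA i j = cA.getD i 0 :: pvWin cA (i + 1) j := by
  unfold pvWin
  rw [List.drop_eq_getElem_cons hi, show j + 1 - i = (j - i) + 1 by omega,
    List.take_succ_cons, List.getD_eq_getElem?_getD, List.getElem?_eq_getElem hi]
  congr 2
  omega

theorem pvWin_snoc (cA : List Nat) (i j : Nat) (hij : i ≤ j + 1) (hj : j + 1 < cA.length) :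
    pvWin cA i (j + 1) = pvWin cA i j ++ [cA.getD (j + 1) 0] := by
  unfold pvWin
  rw [show j + 1 + 1 - i = (j + 1 - i) + 1 by omega, List.take_succ]
  congr 1
  rw [List.getElem?_drop, show i + (j + 1 - i) = j + 1 by omega,
    List.getElem?_eq_getElem hj, List.getD_eq_getElem?_getD, List.getElem?_eq_getElem hj]
  simp

theorem pvWin_single (cA : List Nat) (i : Nat) (hi : i < cA.length) :
    pvWin cA i i = [cA.getD i 0] := by
  unfold pvWin
  rw [List.drop_eq_getElem_cons hi, show i + 1 - i = 1 by omega, List.take_succ_cons,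
    List.take_zero, List.getD_eq_getElem?_getD, List.getElem?_eq_getElem hi]
  simp

theorem pvWin_full (cA : List Nat) (i : Nat) :
    pvWin cA i (cA.length - 1) = cA.drop i := by
  unfold pvWin
  apply List.take_of_length_le
  simp
  omega

theorem pv_getD_mem_win (cA : List Nat) (i0 s r : Nat) (h1 : i0 ≤ s) (h2 : s ≤ r)
    (hr : r < cA.length) : cA.getD s 0 ∈ pvWin cA i0 r := by
  have hs : s < cA.length := by omega
  apply List.mem_of_getElem? (i := s - i0)
  unfold pvWin
  rw [List.getElem?_take, if_pos (by omega), List.getElem?_drop,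
    show i0 + (s - i0) = s by omega, List.getElem?_eq_getElem hs,
    List.getD_eq_getElem cA 0 hs]

theorem pv_count_win_eq_one (cA : List Nat) (t : Nat) (i0 r : Nat) (hi : i0 ≤ r)
    (hr : r < cA.length) (ht : cA.getD r 0 = t)
    (hno : ∀ s, i0 ≤ s → s < r → cA.getD s 0 ≠ t) :
    (pvWin cA i0 r).count t = 1 := by
  induction hd : r - i0 generalizing i0 with
  | zero =>
    have : i0 = r := by omega
    subst this
    rw [pvWin_single cA i0 (by omega), ht]
    simp
  | succ d ih =>
    rw [pvWin_cons cA i0 r (by omega) (by omega), List.count_cons,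
      if_neg (by simpa using hno i0 (le_refl _) (by omega)),
      ih (i0 + 1) (by omega) (fun s hs1 hs2 => hno s (by omega) hs2) (by omega)]

theorem pv_count_one_no_earlier (cA : List Nat) (t : Nat) (i0 r : Nat) (hi : i0 ≤ r)
    (hr : r < cA.length) (ht : cA.getD r 0 = t)
    (hc : (pvWin cA i0 r).count t = 1) :
    ∀ s, i0 ≤ s → s < r → cA.getD s 0 ≠ t := by
  intro s hs1 hs2 heq
  obtain ⟨q, rfl⟩ : ∃ q, r = q + 1 := ⟨r - 1, by omega⟩
  rw [pvWin_snoc cA i0 q (by omega) hr, List.count_append, ht] at hc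
  have h0 : (pvWin cA i0 q).count t = 0 := by simpa using hc
  have : cA.getD s 0 ∈ pvWin cA i0 q := pv_getD_mem_win cA i0 s q hs1 (by omega) (by omega)
  rw [heq] at this
  exact (List.count_eq_zero.mp h0) this

theorem pv_mem_drop_iff (cA : List Nat) (s : Nat) (t : Nat) :
    t ∈ cA.drop s ↔ ∃ r, s ≤ r ∧ r < cA.length ∧ cA.getD r 0 = t := by
  constructor
  · intro h
    obtain ⟨m, hm, he⟩ := List.mem_iff_getElem.mp h
    rw [List.length_drop] at hm
    refine ⟨s + m, by omega, by omega, ?_⟩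
    rw [List.getD_eq_getElem cA 0 (by omega), ← List.getElem_drop (h := by
      rw [List.length_drop]; omega)]
    exact he
  · rintro ⟨r, h1, h2, h3⟩
    apply List.mem_of_getElem? (i := r - s)
    rw [List.getElem?_drop, show s + (r - s) = r by omega, List.getElem?_eq_getElem h2,
      ← List.getD_eq_getElem cA 0 h2, h3]

-- ## the counting loop of A
theorem pv_countA_gen (k : Int) (l : List Int) (occ : List Int)
    (hpre : ∀ a ∈ l, -k ≤ a ∧ a < k) (hlen : occ.length = k.toNat) :
    (l.foldl (fun occ a => PySem.List.pySetD occ a (PySem.List.pyGetD occ a 0 + 1)) occ).length = k.toNat ∧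
    ∀ t, t < k.toNat →
      (l.foldl (fun occ a => PySem.List.pySetD occ a (PySem.List.pyGetD occ a 0 + 1)) occ).getD t 0
        = occ.getD t 0 + ((l.map (pvCellN k.toNat)).count t : Int) := by
  induction l generalizing occ with
  | nil => simp [hlen]
  | cons a l ih =>
    obtain ⟨ha1, ha2⟩ := hpre a (by simp)
    have hk : 0 < k := by omega
    have hbl : -(occ.length : Int) ≤ a := by omega
    have hbu : a < (occ.length : Int) := by omega
    have hcell : pvCellN occ.length a = pvCellN k.toNat a := by rw [hlen]
    have hclt : pvCellN k.toNat a < k.toNat := pvCellN_lt k.toNat a (by omega) (by omega)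
    simp only [List.foldl_cons, pv_set occ a _ hbl hbu, pv_get occ a 0 hbl hbu, hcell]
    have hlen' : (occ.set (pvCellN k.toNat a) (occ.getD (pvCellN k.toNat a) 0 + 1)).length = k.toNat := by
      rw [List.length_set, hlen]
    obtain ⟨ihl, ihv⟩ := ih
      (occ.set (pvCellN k.toNat a) (occ.getD (pvCellN k.toNat a) 0 + 1))
      (fun x hx => hpre x (by simp [hx])) hlen'
    refine ⟨ihl, fun t ht => ?_⟩
    rw [ihv t ht, pv_getD_set occ (pvCellN k.toNat a) t _ 0 (by omega), List.map_cons,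
      List.count_cons]
    by_cases hta : t = pvCellN k.toNat a
    · subst hta
      rw [if_pos rfl, if_pos (by simp)]
      push_cast
      ring
    · rw [if_neg hta, if_neg (by simpa using fun hh => hta hh.symm)]
      push_cast
      ring

-- ## the left loop of A
theorem pv_leftA_spec (A : List Int) (k : Int) (hpre : Pre_find_min_range_colors A k) :
    ∀ (fuel : Nat) (i j : Nat) (occ : List Int), j - i < fuel → i ≤ j → j < A.length →
    pvRep k.toNat (pvCells A k) occ i j →
    ∃ (i' : Nat) (occ' : List Int),
      pvLeftA A (j : Int) fuel (i : Int) occ = ((i' : Int), occ') ∧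
      i ≤ i' ∧ i' ≤ j ∧ pvRep k.toNat (pvCells A k) occ' i' j ∧
      (pvWin (pvCells A k) i' j).count ((pvCells A k).getD i' 0) = 1 ∧
      (∀ m, i ≤ m → m < i' → (pvWin (pvCells A k) m j).count ((pvCells A k).getD m 0) ≥ 2) := by
  intro fuel
  induction fuel with
  | zero => intro i j occ hd; omega
  | succ d ih =>
    intro i j occ hd hij hjn hrep
    by_cases hij' : i < j
    case neg =>
      have hii : i = j := by omega
      subst hii
      refine ⟨i, occ, ?_, le_refl _, le_refl _, hrep, ?_, by omega⟩
      · rw [pvLeftA, if_neg (by rintro ⟨h1, _⟩; omega)]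
      · rw [pvWin_single _ _ (by rw [pvCells_length]; omega)]
        simp
    obtain ⟨hlen, hval⟩ := hrep
    have hiA : i < A.length := by omega
    obtain ⟨ha1, ha2⟩ := hpre _ (pv_getD_mem A i hiA)
    have hk : 0 < k := by omega
    have hclt : pvCellN k.toNat (A.getD i 0) < k.toNat :=
      pvCellN_lt k.toNat (A.getD i 0) (by omega) (by omega)
    have e1 : PySem.List.pyGetD A ((i : Nat) : Int) 0 = A.getD i 0 := by
      simp
    have e2 : PySem.List.pyGetD occ (A.getD i 0) 0
        = occ.getD (pvCellN k.toNat (A.getD i 0)) 0 := by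
      rw [pv_get occ _ 0 (by omega) (by omega), hlen]
    have hcell : (pvCells A k).getD i 0 = pvCellN k.toNat (A.getD i 0) := pvCells_getD A k i hiA
    have hcnt : occ.getD (pvCellN k.toNat (A.getD i 0)) 0
        = ((pvWin (pvCells A k) i j).count ((pvCells A k).getD i 0) : Int) := by
      rw [← hcell]
      exact hval _ (by rw [hcell]; exact hclt)
    by_cases hc : occ.getD (pvCellN k.toNat (A.getD i 0)) 0 - 1 > 0
    · -- the loop steps: the window's left cell occurs at least twice
      have hcnt2 : (pvWin (pvCells A k) i j).count ((pvCells A k).getD i 0) ≥ 2 := by omega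
      rw [pvLeftA, if_pos ⟨by exact_mod_cast hij', by rw [e1, e2]; exact hc⟩]
      rw [e1, e2, pv_set occ _ _ (by omega) (by omega), hlen,
        show ((i : Nat) : Int) + 1 = (((i + 1 : Nat)) : Int) by push_cast; ring]
      have hwin : pvWin (pvCells A k) i j
          = (pvCells A k).getD i 0 :: pvWin (pvCells A k) (i + 1) j := by
        exact pvWin_cons _ _ _ (by omega) (by rw [pvCells_length]; omega)
      obtain ⟨i', occ', heq, hge, hle, hrep', hone, hmin⟩ :=
        ih (i + 1) j (occ.set (pvCellN k.toNat (A.getD i 0)) (occ.getD (pvCellN k.toNat (A.getD i 0)) 0 - 1))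
          (by omega) (by omega) hjn
          ⟨by rw [List.length_set, hlen], by
            intro t ht
            rw [pv_getD_set occ _ t _ 0 (by omega)]
            by_cases hta : t = pvCellN k.toNat (A.getD i 0)
            · subst hta
              rw [if_pos rfl]
              have harr : occ.getD (pvCellN k.toNat (A.getD i 0)) 0
                  = ((pvWin (pvCells A k) (i + 1) j).count (pvCellN k.toNat (A.getD i 0)) : Int) + 1 := by
                rw [hcnt, hwin, hcell, List.count_cons, if_pos (by simp)]
                push_cast
                ring
              omega
            · rw [if_neg hta, hval t ht, hwin, hcell, List.count_cons,
                if_neg (by simpa using fun hh => hta hh.symm)]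
              push_cast
              ring⟩
      refine ⟨i', occ', heq, by omega, hle, hrep', hone, ?_⟩
      intro m hm1 hm2
      rcases Nat.eq_or_lt_of_le hm1 with hmi | hmi
      · subst hmi; exact hcnt2
      · exact hmin m hmi hm2
    · -- the loop stops here; the left cell occurs exactly once
      rw [pvLeftA, if_neg (by rintro ⟨_, hcc⟩; rw [e1, e2] at hcc; exact hc hcc)]
      have hmem : (pvCells A k).getD i 0 ∈ pvWin (pvCells A k) i j :=
        pv_getD_mem_win _ i i j (le_refl _) (by omega) (by rw [pvCells_length]; omega)
      have h1 : (pvWin (pvCells A k) i j).count ((pvCells A k).getD i 0) ≥ 1 :=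
        List.one_le_count_iff.mpr hmem
      exact ⟨i, occ, rfl, le_refl _, by omega, ⟨hlen, hval⟩, by omega, by omega⟩

-- ## the right loop of A
theorem pv_rightA_spec (A : List Int) (k : Int) (hpre : Pre_find_min_range_colors A k) :
    ∀ (fuel : Nat) (i j : Nat) (occ : List Int), j - i < fuel → i ≤ j → j < A.length →
    pvRep k.toNat (pvCells A k) occ i j →
    ∃ (j' : Nat) (occ' : List Int),
      pvRightA A (i : Int) fuel (j : Int) occ = ((j' : Int), occ') ∧
      i ≤ j' ∧ j' ≤ j ∧ pvRep k.toNat (pvCells A k) occ' i j' ∧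
      (pvWin (pvCells A k) i j').count ((pvCells A k).getD j' 0) = 1 ∧
      (∀ m, j' < m → m ≤ j → (pvWin (pvCells A k) i m).count ((pvCells A k).getD m 0) ≥ 2) := by
  intro fuel
  induction fuel with
  | zero => intro i j occ hd; omega
  | succ d ih =>
    intro i j occ hd hij hjn hrep
    by_cases hij' : i < j
    case neg =>
      have hii : i = j := by omega
      subst hii
      refine ⟨i, occ, ?_, le_refl _, le_refl _, hrep, ?_, by omega⟩
      · rw [pvRightA, if_neg (by rintro ⟨h1, _⟩; omega)]
      · rw [pvWin_single _ _ (by rw [pvCells_length]; omega)]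
        simp
    obtain ⟨hlen, hval⟩ := hrep
    have hjA : j < A.length := hjn
    obtain ⟨ha1, ha2⟩ := hpre _ (pv_getD_mem A j hjA)
    have hk : 0 < k := by omega
    have hclt : pvCellN k.toNat (A.getD j 0) < k.toNat :=
      pvCellN_lt k.toNat (A.getD j 0) (by omega) (by omega)
    have e1 : PySem.List.pyGetD A ((j : Nat) : Int) 0 = A.getD j 0 := by
      simp
    have e2 : PySem.List.pyGetD occ (A.getD j 0) 0
        = occ.getD (pvCellN k.toNat (A.getD j 0)) 0 := by
      rw [pv_get occ _ 0 (by omega) (by omega), hlen]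
    have hcell : (pvCells A k).getD j 0 = pvCellN k.toNat (A.getD j 0) := pvCells_getD A k j hjA
    have hcnt : occ.getD (pvCellN k.toNat (A.getD j 0)) 0
        = ((pvWin (pvCells A k) i j).count ((pvCells A k).getD j 0) : Int) := by
      rw [← hcell]
      exact hval _ (by rw [hcell]; exact hclt)
    have hwin : pvWin (pvCells A k) i j
        = pvWin (pvCells A k) i (j - 1) ++ [(pvCells A k).getD j 0] := by
      have := pvWin_snoc (pvCells A k) i (j - 1) (by omega) (by rw [pvCells_length]; omega)
      rw [show j - 1 + 1 = j by omega] at this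
      exact this
    by_cases hc : occ.getD (pvCellN k.toNat (A.getD j 0)) 0 - 1 > 0
    · have hcnt2 : (pvWin (pvCells A k) i j).count ((pvCells A k).getD j 0) ≥ 2 := by omega
      rw [pvRightA, if_pos ⟨by exact_mod_cast hij', by rw [e1, e2]; exact hc⟩]
      rw [e1, e2, pv_set occ _ _ (by omega) (by omega), hlen,
        show ((j : Nat) : Int) - 1 = (((j - 1 : Nat)) : Int) by push_cast [Nat.cast_sub (by omega : 1 ≤ j)]; ring]
      obtain ⟨j', occ', heq, hge, hle, hrep', hone, hmax⟩ :=
        ih i (j - 1) (occ.set (pvCellN k.toNat (A.getD j 0)) (occ.getD (pvCellN k.toNat (A.getD j 0)) 0 - 1))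
          (by omega) (by omega) (by omega)
          ⟨by rw [List.length_set, hlen], by
            intro t ht
            rw [pv_getD_set occ _ t _ 0 (by omega)]
            by_cases hta : t = pvCellN k.toNat (A.getD j 0)
            · subst hta
              rw [if_pos rfl]
              have harr : occ.getD (pvCellN k.toNat (A.getD j 0)) 0
                  = ((pvWin (pvCells A k) i (j - 1)).count (pvCellN k.toNat (A.getD j 0)) : Int) + 1 := by
                rw [hcnt, hwin, hcell, List.count_append]
                simp
              omega
            · rw [if_neg hta, hval t ht, hwin, hcell, List.count_append]
              have : List.count t [pvCellN k.toNat (A.getD j 0)] = 0 := by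
                simp only [List.count_singleton, beq_iff_eq]
                exact if_neg (fun hh => hta hh.symm)
              rw [this]
              push_cast
              ring⟩
      refine ⟨j', occ', heq, hge, by omega, hrep', hone, ?_⟩
      intro m hm1 hm2
      rcases Nat.eq_or_lt_of_le hm2 with hmj | hmj
      · subst hmj; exact hcnt2
      · exact hmax m hm1 (by omega)
    · rw [pvRightA, if_neg (by rintro ⟨_, hcc⟩; rw [e1, e2] at hcc; exact hc hcc)]
      have hmem : (pvCells A k).getD j 0 ∈ pvWin (pvCells A k) i j :=
        pv_getD_mem_win _ i j j hij (le_refl _) (by rw [pvCells_length]; omega)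
      have h1 : (pvWin (pvCells A k) i j).count ((pvCells A k).getD j 0) ≥ 1 :=
        List.one_le_count_iff.mpr hmem
      exact ⟨j, occ, rfl, hij, le_refl _, ⟨hlen, hval⟩, by omega, by omega⟩

theorem pv_cell_lt (A : List Int) (k : Int) (hpre : Pre_find_min_range_colors A k)
    (m : Nat) (hm : m < A.length) : (pvCells A k).getD m 0 < k.toNat := by
  obtain ⟨h1, h2⟩ := hpre _ (pv_getD_mem A m hm)
  rw [pvCells_getD A k m hm]
  exact pvCellN_lt k.toNat _ (by omega) (by omega)

theorem pv_cond_eval (A : List Int) (k : Int) (hpre : Pre_find_min_range_colors A k)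
    (occ : List Int) (hlen : occ.length = k.toNat) (m : Nat) (hm : m < A.length) (d : Int) :
    PySem.List.pyGetD occ (PySem.List.pyGetD A ((m : Nat) : Int) 0) d
      = occ.getD ((pvCells A k).getD m 0) d := by
  obtain ⟨h1, h2⟩ := hpre _ (pv_getD_mem A m hm)
  rw [PySem.List.pyGetD_natCast, pv_get occ _ d (by omega) (by omega), hlen,
    pvCells_getD A k m hm]

theorem pv_win_sublist_drop (cA : List Nat) (i j : Nat) :
    (pvWin cA i j).Sublist (cA.drop i) := by
  unfold pvWin
  exact List.take_sublist _ _

-- ## what A computes: the characterised pair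
theorem pv_outerA_spec (A : List Int) (k : Int) (hpre : Pre_find_min_range_colors A k)
    (hA : A ≠ []) :
    ∃ (i' j' : Nat),
      find_min_range_colors A k = ((i' : Int), (j' : Int)) ∧
      i' ≤ j' ∧ j' ≤ A.length - 1 ∧
      ((pvCells A k).drop i').count ((pvCells A k).getD i' 0) = 1 ∧
      (∀ m, m < i' → ((pvCells A k).drop m).count ((pvCells A k).getD m 0) ≥ 2) ∧
      (pvWin (pvCells A k) i' j').count ((pvCells A k).getD j' 0) = 1 ∧
      (∀ m, j' < m → m ≤ A.length - 1 →
        (pvWin (pvCells A k) i' m).count ((pvCells A k).getD m 0) ≥ 2) := by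
  have hn : 0 < A.length := List.length_pos_iff.mpr hA
  have hk : 0 < k := by
    obtain ⟨a, ha⟩ := List.exists_mem_of_ne_nil A hA
    obtain ⟨h1, h2⟩ := hpre a ha
    omega
  have hfull : ∀ m : Nat, pvWin (pvCells A k) m (A.length - 1) = (pvCells A k).drop m := by
    intro m
    have := pvWin_full (pvCells A k) m
    rwa [pvCells_length] at this
  obtain ⟨hoL, hoV⟩ := pv_countA_gen k A (List.replicate k.toNat 0) hpre (by simp)
  have hrep0 : pvRep k.toNat (pvCells A k)
      (A.foldl (fun occ a => PySem.List.pySetD occ a (PySem.List.pyGetD occ a 0 + 1))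
        (List.replicate k.toNat 0)) 0 (A.length - 1) := by
    refine ⟨hoL, fun t ht => ?_⟩
    rw [hoV t ht, List.getD_replicate 0 ht, hfull 0, List.drop_zero]
    simp [pvCells]
  unfold find_min_range_colors
  dsimp only
  have hj : ((A.length : Int) - 1) = (((A.length - 1 : Nat)) : Int) := by omega
  rw [hj]
  obtain ⟨i', occ', heqL, hgeL, hleL, hrepL, honeL, hminL⟩ :=
    pv_leftA_spec A k hpre (((((A.length - 1 : Nat)) : Int) - ((0 : Nat) : Int)).toNat + 1)
      0 (A.length - 1) _ (by omega) (by omega) (by omega) hrep0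
  rw [Nat.cast_zero] at heqL
  obtain ⟨j', occ'', heqR, hgeR, hleR, hrepR, honeR, hmaxR⟩ :=
    pv_rightA_spec A k hpre (((((A.length - 1 : Nat)) : Int) - ((i' : Nat) : Int)).toNat + 1)
      i' (A.length - 1) occ' (by omega) hleL (by omega) hrepL
  have hPi : ((pvCells A k).drop i').count ((pvCells A k).getD i' 0) = 1 := by
    rw [← hfull i']
    exact honeL
  have hPmin : ∀ m, m < i' → ((pvCells A k).drop m).count ((pvCells A k).getD m 0) ≥ 2 := by
    intro m hm
    rw [← hfull m]
    exact hminL m (by omega) hm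
  -- evaluate the outer loop
  rw [pvOuterA]
  by_cases hlt : (0 : Int) < ((A.length - 1 : Nat) : Int)
  · rw [if_pos hlt, heqL]
    simp only [heqR]
    by_cases hch : (i' : Int) = (0 : Int) ∧ (j' : Int) = ((A.length - 1 : Nat) : Int)
    · rw [if_pos hch]
      exact ⟨i', j', by rw [← hch.1, ← hch.2], by omega, by omega, hPi, hPmin, honeR, hmaxR⟩
    · rw [if_neg hch]
      refine ⟨i', j', ?_, by omega, by omega, hPi, hPmin, honeR, hmaxR⟩
      -- the second outer iteration makes no move and breaks
      rw [show ((((A.length - 1 : Nat) : Int)).toNat) = ((((A.length - 1 : Nat) : Int)).toNat - 1) + 1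
        by omega]
      rw [pvOuterA]
      by_cases hij2 : (i' : Int) < (j' : Int)
      · have hi'n : i' < A.length := by omega
        have hj'n : j' < A.length := by omega
        obtain ⟨hlen'', hval''⟩ := hrepR
        have hcntI : occ''.getD ((pvCells A k).getD i' 0) 0
            = ((pvWin (pvCells A k) i' j').count ((pvCells A k).getD i' 0) : Int) :=
          hval'' _ (pv_cell_lt A k hpre i' hi'n)
        have honeI : (pvWin (pvCells A k) i' j').count ((pvCells A k).getD i' 0) = 1 := by
          have hle1 : (pvWin (pvCells A k) i' j').count ((pvCells A k).getD i' 0)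
              ≤ ((pvCells A k).drop i').count ((pvCells A k).getD i' 0) :=
            (pv_win_sublist_drop (pvCells A k) i' j').count_le _
          have hge1 : (pvWin (pvCells A k) i' j').count ((pvCells A k).getD i' 0) ≥ 1 :=
            List.one_le_count_iff.mpr (pv_getD_mem_win _ i' i' j' (le_refl _) (by omega)
              (by rw [pvCells_length]; omega))
          omega
        have hLnoop : ∀ f : Nat, pvLeftA A (j' : Int) f ((i' : Nat) : Int) occ''
            = ((i' : Int), occ'') := by
          intro f
          cases f with
          | zero => rfl
          | succ f =>
            rw [pvLeftA, if_neg]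
            rintro ⟨_, hcc⟩
            rw [pv_cond_eval A k hpre occ'' hlen'' i' hi'n 0, hcntI, honeI] at hcc
            omega
        have hcntJ : occ''.getD ((pvCells A k).getD j' 0) 0
            = ((pvWin (pvCells A k) i' j').count ((pvCells A k).getD j' 0) : Int) :=
          hval'' _ (pv_cell_lt A k hpre j' hj'n)
        have hRnoop : ∀ f : Nat, pvRightA A (i' : Int) f ((j' : Nat) : Int) occ''
            = ((j' : Int), occ'') := by
          intro f
          cases f with
          | zero => rfl
          | succ f =>
            rw [pvRightA, if_neg]
            rintro ⟨_, hcc⟩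
            rw [pv_cond_eval A k hpre occ'' hlen'' j' hj'n 0, hcntJ, honeR] at hcc
            omega
        rw [if_pos hij2]
        simp [hLnoop, hRnoop]
      · rw [if_neg hij2]
  · rw [if_neg hlt]
    have hi0 : A.length = 1 := by omega
    have hone : (pvWin (pvCells A k) 0 0).count ((pvCells A k).getD 0 0) = 1 := by
      rw [pvWin_single _ _ (by rw [pvCells_length]; omega)]
      simp
    refine ⟨0, 0, by simp; omega, le_refl _, by omega, ?_, by omega, hone, by omega⟩
    rw [← hfull 0, hi0]
    exact hone

-- ## B: last-occurrence table
def pvLastOcc (cA : List Nat) : Nat → Nat → Int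
  | 0, _ => -1
  | m + 1, t => if cA.getD m 0 = t then ((m : Nat) : Int) else pvLastOcc cA m t

theorem pv_lastfold (A : List Int) (k : Int) (hpre : Pre_find_min_range_colors A k)
    (m : Nat) (hm : m ≤ A.length) :
    ((PySem.List.pyRange 0 (m : Int) 1).foldl
        (fun l idx => PySem.List.pySetD l (PySem.List.pyGetD A idx 0) idx)
        (List.replicate k.toNat (-1))).length = k.toNat ∧
    ∀ t, t < k.toNat →
      ((PySem.List.pyRange 0 (m : Int) 1).foldl
          (fun l idx => PySem.List.pySetD l (PySem.List.pyGetD A idx 0) idx)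
          (List.replicate k.toNat (-1))).getD t (-1) = pvLastOcc (pvCells A k) m t := by
  induction m with
  | zero =>
    rw [show ((0 : Nat) : Int) = (0 : Int) by simp, PySem.List.pyRange_one_eq_nil (le_refl 0)]
    exact ⟨by simp, fun t ht => by simp [pvLastOcc, List.getD_replicate _ ht]⟩
  | succ m ih =>
    obtain ⟨ihL, ihV⟩ := ih (by omega)
    have hmn : m < A.length := by omega
    obtain ⟨ha1, ha2⟩ := hpre _ (pv_getD_mem A m hmn)
    have hk : 0 < k := by omega
    rw [show ((m + 1 : Nat) : Int) = ((m : Nat) : Int) + 1 by push_cast; ring,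
      PySem.List.pyRange_one_succ_right (by positivity), List.foldl_append]
    simp only [List.foldl_cons, List.foldl_nil]
    rw [PySem.List.pyGetD_natCast, pv_set _ _ _ (by rw [ihL]; omega) (by rw [ihL]; omega), ihL]
    have hcell : (pvCells A k).getD m 0 = pvCellN k.toNat (A.getD m 0) := pvCells_getD A k m hmn
    refine ⟨by rw [List.length_set, ihL], fun t ht => ?_⟩
    rw [pv_getD_set _ _ t _ _ (by rw [ihL]; exact pvCellN_lt _ _ (by omega) (by omega)),
      show pvLastOcc (pvCells A k) (m + 1) t
        = if (pvCells A k).getD m 0 = t then ((m : Nat) : Int) else pvLastOcc (pvCells A k) m t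
        from rfl, hcell]
    by_cases hta : t = pvCellN k.toNat (A.getD m 0)
    · rw [if_pos hta, if_pos hta.symm]
    · rw [if_neg hta, if_neg (fun hh => hta hh.symm), ihV t ht]

theorem pv_lastOcc_ge (cA : List Nat) (m t i : Nat) (hi : i < m) (ht : cA.getD i 0 = t) :
    (i : Int) ≤ pvLastOcc cA m t := by
  induction m with
  | zero => omega
  | succ m ih =>
    show (i : Int) ≤ if cA.getD m 0 = t then ((m : Nat) : Int) else pvLastOcc cA m t
    by_cases hm : cA.getD m 0 = t
    · rw [if_pos hm]; omega
    · rw [if_neg hm]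
      have him : i < m := by
        rcases Nat.lt_succ_iff_lt_or_eq.mp hi with h | h
        · exact h
        · subst h; exact absurd ht hm
      exact ih him

theorem pv_lastOcc_cases (cA : List Nat) (m t : Nat) :
    pvLastOcc cA m t = -1 ∨
    ∃ r : Nat, r < m ∧ pvLastOcc cA m t = (r : Int) ∧ cA.getD r 0 = t ∧
      ∀ s, r < s → s < m → cA.getD s 0 ≠ t := by
  induction m with
  | zero => left; rfl
  | succ m ih =>
    rw [show pvLastOcc cA (m + 1) t
      = (if cA.getD m 0 = t then ((m : Nat) : Int) else pvLastOcc cA m t) from rfl]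
    by_cases hm : cA.getD m 0 = t
    · rw [if_pos hm]
      right
      exact ⟨m, by omega, rfl, hm, fun s hs1 hs2 => by omega⟩
    · rw [if_neg hm]
      rcases ih with h | ⟨r, hr1, hr2, hr3, hr4⟩
      · left; exact h
      · right
        refine ⟨r, by omega, hr2, hr3, fun s hs1 hs2 => ?_⟩
        rcases Nat.lt_succ_iff_lt_or_eq.mp hs2 with h | h
        · exact hr4 s hs1 h
        · subst h; exact hm

theorem pv_lastOcc_eq_self_iff (cA : List Nat) (i : Nat) (hi : i < cA.length) :
    pvLastOcc cA cA.length (cA.getD i 0) = (i : Int) ↔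
    (cA.drop i).count (cA.getD i 0) = 1 := by
  have hsucc : (cA.drop i).count (cA.getD i 0)
      = (cA.drop (i + 1)).count (cA.getD i 0) + 1 := by
    rw [List.drop_eq_getElem_cons hi, List.count_cons, ← List.getD_eq_getElem cA 0 hi,
      if_pos (by simp)]
  constructor
  · intro h
    have hno : ∀ s, i < s → s < cA.length → cA.getD s 0 ≠ cA.getD i 0 := by
      rcases pv_lastOcc_cases cA cA.length (cA.getD i 0) with hm1 | ⟨r, hr1, hr2, hr3, hr4⟩
      · rw [hm1] at h; omega
      · have hri : r = i := by rw [hr2] at h; exact_mod_cast h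
        subst hri
        exact hr4
    have h0 : (cA.drop (i + 1)).count (cA.getD i 0) = 0 := by
      rw [List.count_eq_zero]
      rw [pv_mem_drop_iff]
      rintro ⟨r, hr1, hr2, hr3⟩
      exact hno r (by omega) hr2 hr3
    omega
  · intro hcnt
    have h0 : (cA.drop (i + 1)).count (cA.getD i 0) = 0 := by omega
    have hno : ∀ s, i < s → s < cA.length → cA.getD s 0 ≠ cA.getD i 0 := by
      intro s hs1 hs2 heq
      exact (List.count_eq_zero.mp h0) ((pv_mem_drop_iff cA (i + 1) _).mpr ⟨s, by omega, hs2, heq⟩)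
    have hge := pv_lastOcc_ge cA cA.length (cA.getD i 0) i hi rfl
    rcases pv_lastOcc_cases cA cA.length (cA.getD i 0) with hm1 | ⟨r, hr1, hr2, hr3, hr4⟩
    · rw [hm1] at hge; exact absurd hge (by omega)
    · rw [hr2] at hge ⊢
      have hri : r = i := by
        by_contra hne
        exact hno r (by omega) hr1 hr3
      rw [hri]

-- ## B: the i-scan
theorem pv_findIB_eq (A : List Int) (k : Int) (hpre : Pre_find_min_range_colors A k)
    (last : List Int) (hlen : last.length = k.toNat)
    (hlast : ∀ t, t < k.toNat → last.getD t (-1) = pvLastOcc (pvCells A k) A.length t)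
    (i' : Nat) (hi' : i' < A.length)
    (hP : ((pvCells A k).drop i').count ((pvCells A k).getD i' 0) = 1)
    (hmin : ∀ m, m < i' → ((pvCells A k).drop m).count ((pvCells A k).getD m 0) ≥ 2) :
    ∀ (fuel i0 : Nat), i' - i0 < fuel → i0 ≤ i' → pvFindIB A last fuel (i0 : Int) = (i' : Int) := by
  have hcA : (pvCells A k).length = A.length := pvCells_length A k
  intro fuel
  induction fuel with
  | zero => intro i0 hd; omega
  | succ d ih =>
    intro i0 hd hle
    by_cases hstop : i0 = i'
    · subst hstop
      rw [pvFindIB, if_neg]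
      rintro ⟨_, hcc⟩
      apply hcc
      rw [pv_cond_eval A k hpre last hlen i0 hi' (-1),
        hlast _ (pv_cell_lt A k hpre i0 hi'), ← hcA]
      exact (pv_lastOcc_eq_self_iff (pvCells A k) i0 (by omega)).mpr hP
    · have hi0n : i0 < A.length := by omega
      have hcond : PySem.List.pyGetD last (PySem.List.pyGetD A ((i0 : Nat) : Int) 0) (-1) ≠ (i0 : Int) := by
        rw [pv_cond_eval A k hpre last hlen i0 hi0n (-1), hlast _ (pv_cell_lt A k hpre i0 hi0n), ← hcA]
        intro heq
        have h1 := (pv_lastOcc_eq_self_iff (pvCells A k) i0 (by omega)).mp heq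
        have h2 := hmin i0 (by omega)
        omega
      rw [pvFindIB, if_pos ⟨by exact_mod_cast hi0n, hcond⟩,
        show ((i0 : Nat) : Int) + 1 = (((i0 + 1 : Nat)) : Int) by push_cast; ring]
      exact ih (i0 + 1) (by omega) (by omega)

-- ## B: first-occurrence table
def pvFirstOcc (cA : List Nat) (i0 : Nat) : Nat → Nat → Int
  | 0, _ => -1
  | c + 1, t =>
    if pvFirstOcc cA i0 c t = -1 ∧ cA.getD (i0 + c) 0 = t then ((i0 + c : Nat) : Int)
    else pvFirstOcc cA i0 c t

theorem pv_firstfold (A : List Int) (k : Int) (hpre : Pre_find_min_range_colors A k)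
    (i0 : Nat) (c : Nat) (hc : i0 + c ≤ A.length) :
    ((PySem.List.pyRange (i0 : Int) ((i0 + c : Nat) : Int) 1).foldl
        (fun f idx =>
          if PySem.List.pyGetD f (PySem.List.pyGetD A idx 0) (-1) = -1 then
            PySem.List.pySetD f (PySem.List.pyGetD A idx 0) idx
          else f)
        (List.replicate k.toNat (-1))).length = k.toNat ∧
    ∀ t, t < k.toNat →
      ((PySem.List.pyRange (i0 : Int) ((i0 + c : Nat) : Int) 1).foldl
          (fun f idx =>
            if PySem.List.pyGetD f (PySem.List.pyGetD A idx 0) (-1) = -1 then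
              PySem.List.pySetD f (PySem.List.pyGetD A idx 0) idx
            else f)
          (List.replicate k.toNat (-1))).getD t (-1) = pvFirstOcc (pvCells A k) i0 c t := by
  induction c with
  | zero =>
    rw [show ((i0 + 0 : Nat) : Int) = ((i0 : Nat) : Int) by norm_num,
      PySem.List.pyRange_one_eq_nil (le_refl _)]
    exact ⟨by simp, fun t ht => by simp [pvFirstOcc, List.getD_replicate _ ht]⟩
  | succ c ih =>
    obtain ⟨ihL, ihV⟩ := ih (by omega)
    have hmn : i0 + c < A.length := by omega
    obtain ⟨ha1, ha2⟩ := hpre _ (pv_getD_mem A (i0 + c) hmn)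
    have hk : 0 < k := by omega
    have hcell : (pvCells A k).getD (i0 + c) 0 = pvCellN k.toNat (A.getD (i0 + c) 0) :=
      pvCells_getD A k (i0 + c) hmn
    have hclt : pvCellN k.toNat (A.getD (i0 + c) 0) < k.toNat :=
      pvCellN_lt _ _ (by omega) (by omega)
    rw [show ((i0 + (c + 1) : Nat) : Int) = ((i0 + c : Nat) : Int) + 1 by push_cast; ring,
      PySem.List.pyRange_one_succ_right (by exact_mod_cast Nat.le_add_right i0 c),
      List.foldl_append]
    simp only [List.foldl_cons, List.foldl_nil]
    rw [pv_cond_eval A k hpre _ ihL (i0 + c) hmn (-1), ihV _ (by first | exact hclt | (rw [hcell]; exact hclt))]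
    have hunf : ∀ u, pvFirstOcc (pvCells A k) i0 (c + 1) u
        = (if pvFirstOcc (pvCells A k) i0 c u = -1 ∧ (pvCells A k).getD (i0 + c) 0 = u
           then ((i0 + c : Nat) : Int) else pvFirstOcc (pvCells A k) i0 c u) := fun u => rfl
    by_cases hupd : pvFirstOcc (pvCells A k) i0 c ((pvCells A k).getD (i0 + c) 0) = -1
    · rw [if_pos hupd, PySem.List.pyGetD_natCast,
        pv_set _ _ _ (by rw [ihL]; omega) (by rw [ihL]; omega), ihL]
      refine ⟨by rw [List.length_set, ihL], fun t ht => ?_⟩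
      rw [pv_getD_set _ _ t _ _ (by rw [ihL]; exact hclt), hunf t]
      by_cases hta : t = pvCellN k.toNat (A.getD (i0 + c) 0)
      · rw [if_pos hta,
          if_pos ⟨by rw [hta, ← hcell]; exact hupd, by rw [hcell]; exact hta.symm⟩]
      · rw [if_neg hta, if_neg (by rw [hcell]; rintro ⟨_, hh⟩; exact hta hh.symm), ihV t ht]
    · rw [if_neg hupd]
      refine ⟨ihL, fun t ht => ?_⟩
      rw [hunf t, ihV t ht]
      by_cases hta : (pvCells A k).getD (i0 + c) 0 = t
      · rw [if_neg (by rw [← hta]; rintro ⟨hh, _⟩; exact hupd hh)]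
      · rw [if_neg (by rintro ⟨_, hh⟩; exact hta hh)]

theorem pv_firstOcc_ne_neg_one (cA : List Nat) (i0 c t w : Nat) (hw1 : i0 ≤ w)
    (hw2 : w < i0 + c) (ht : cA.getD w 0 = t) : pvFirstOcc cA i0 c t ≠ -1 := by
  induction c with
  | zero => omega
  | succ c ih =>
    rw [show pvFirstOcc cA i0 (c + 1) t
      = (if pvFirstOcc cA i0 c t = -1 ∧ cA.getD (i0 + c) 0 = t then ((i0 + c : Nat) : Int)
         else pvFirstOcc cA i0 c t) from rfl]
    by_cases hcond : pvFirstOcc cA i0 c t = -1 ∧ cA.getD (i0 + c) 0 = t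
    · rw [if_pos hcond]; omega
    · rw [if_neg hcond]
      by_cases hwc : w < i0 + c
      · exact ih hwc
      · have hwe : w = i0 + c := by omega
        subst hwe
        intro hne
        exact hcond ⟨hne, ht⟩

theorem pv_firstOcc_cases (cA : List Nat) (i0 c t : Nat) :
    pvFirstOcc cA i0 c t = -1 ∨
    ∃ r : Nat, i0 ≤ r ∧ r < i0 + c ∧ pvFirstOcc cA i0 c t = (r : Int) ∧ cA.getD r 0 = t ∧
      ∀ s, i0 ≤ s → s < r → cA.getD s 0 ≠ t := by
  induction c with
  | zero => left; rfl
  | succ c ih =>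
    rw [show pvFirstOcc cA i0 (c + 1) t
      = (if pvFirstOcc cA i0 c t = -1 ∧ cA.getD (i0 + c) 0 = t then ((i0 + c : Nat) : Int)
         else pvFirstOcc cA i0 c t) from rfl]
    by_cases hcond : pvFirstOcc cA i0 c t = -1 ∧ cA.getD (i0 + c) 0 = t
    · rw [if_pos hcond]
      right
      refine ⟨i0 + c, by omega, by omega, rfl, hcond.2, fun s hs1 hs2 heq => ?_⟩
      exact pv_firstOcc_ne_neg_one cA i0 c t s hs1 hs2 heq hcond.1
    · rw [if_neg hcond]
      rcases ih with h | ⟨r, hr1, hr2, hr3, hr4, hr5⟩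
      · left; exact h
      · right; exact ⟨r, hr1, by omega, hr3, hr4, hr5⟩

theorem pv_firstOcc_le_of_occ (cA : List Nat) (i0 c t w : Nat) (hw1 : i0 ≤ w)
    (hw2 : w < i0 + c) (ht : cA.getD w 0 = t) :
    ∃ r : Nat, pvFirstOcc cA i0 c t = (r : Int) ∧ i0 ≤ r ∧ r ≤ w ∧ cA.getD r 0 = t ∧
      ∀ s, i0 ≤ s → s < r → cA.getD s 0 ≠ t := by
  rcases pv_firstOcc_cases cA i0 c t with h | ⟨r, hr1, hr2, hr3, hr4, hr5⟩
  · exact absurd h (pv_firstOcc_ne_neg_one cA i0 c t w hw1 hw2 ht)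
  · refine ⟨r, hr3, hr1, ?_, hr4, hr5⟩
    by_contra hlt
    exact hr5 w hw1 (by omega) ht

theorem pv_foldl_max_le_int (l : List Int) (g : Int → Int) :
    ∀ (init b : Int), init ≤ b → (∀ x ∈ l, g x ≤ b) →
    l.foldl (fun a x => max a (g x)) init ≤ b := by
  induction l with
  | nil => intro init b h0 _; simpa using h0
  | cons x xs ih =>
    intro init b h0 h
    simp only [List.foldl_cons]
    exact ih _ _ (max_le h0 (h x (by simp))) (fun y hy => h y (by simp [hy]))

-- ## what B computes
theorem pv_altB_spec (A : List Int) (k : Int) (hpre : Pre_find_min_range_colors A k)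
    (hA : A ≠ []) (i' j' : Nat)
    (hi'n : i' < A.length) (hij : i' ≤ j') (hjn : j' ≤ A.length - 1)
    (hP : ((pvCells A k).drop i').count ((pvCells A k).getD i' 0) = 1)
    (hPmin : ∀ m, m < i' → ((pvCells A k).drop m).count ((pvCells A k).getD m 0) ≥ 2)
    (hQ : (pvWin (pvCells A k) i' j').count ((pvCells A k).getD j' 0) = 1)
    (hQmax : ∀ m, j' < m → m ≤ A.length - 1 →
      (pvWin (pvCells A k) i' m).count ((pvCells A k).getD m 0) ≥ 2) :
    find_min_range_colors_alt A k = ((i' : Int), (j' : Int)) := by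
  have hn : 0 < A.length := List.length_pos_iff.mpr hA
  have hcA : (pvCells A k).length = A.length := pvCells_length A k
  unfold find_min_range_colors_alt
  dsimp only
  rw [if_neg (by omega : ¬ A.length = 0)]
  obtain ⟨hlastL, hlastV⟩ := pv_lastfold A k hpre A.length (le_refl _)
  have hscan := pv_findIB_eq A k hpre _ hlastL hlastV i' hi'n hP hPmin (A.length + 1) 0
    (by omega) (by omega)
  rw [Nat.cast_zero] at hscan
  rw [hscan]
  have hsplit : ((A.length : Nat) : Int) = ((i' + (A.length - i') : Nat) : Int) := by omega
  rw [hsplit]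
  obtain ⟨hfL, hfV⟩ := pv_firstfold A k hpre i' (A.length - i') (by omega)
  set F := (PySem.List.pyRange ((i' : Nat) : Int) ((i' + (A.length - i') : Nat) : Int) 1).foldl
    (fun f idx =>
      if PySem.List.pyGetD f (PySem.List.pyGetD A idx 0) (-1) = -1 then
        PySem.List.pySetD f (PySem.List.pyGetD A idx 0) idx
      else f)
    (List.replicate k.toNat (-1)) with hFdef
  have Fev : ∀ m : Nat, i' ≤ m → m < A.length →
      PySem.List.pyGetD F (PySem.List.pyGetD A ((m : Nat) : Int) 0) (-1)
        = pvFirstOcc (pvCells A k) i' (A.length - i') ((pvCells A k).getD m 0) := by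
    intro m hm1 hm2
    rw [pv_cond_eval A k hpre F hfL m hm2 (-1)]
    exact hfV _ (pv_cell_lt A k hpre m hm2)
  have hfold : (PySem.List.pyRange ((i' : Nat) : Int) ((i' + (A.length - i') : Nat) : Int) 1).foldl
      (fun j idx => max j (PySem.List.pyGetD F (PySem.List.pyGetD A idx 0) (-1))) ((i' : Nat) : Int)
      = ((j' : Nat) : Int) := by
    apply le_antisymm
    · apply pv_foldl_max_le_int _ (fun idx => PySem.List.pyGetD F (PySem.List.pyGetD A idx 0) (-1))
        _ _ (by exact_mod_cast hij)
      intro x hx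
      rw [PySem.List.mem_pyRange_one] at hx
      have hxm : x = ((x.toNat : Nat) : Int) := by omega
      have hmL : i' ≤ x.toNat := by omega
      have hmU : x.toNat < A.length := by omega
      rw [hxm, Fev x.toNat hmL hmU]
      obtain ⟨r, hrEq, hr1, hr2, hr3, hr4⟩ :=
        pv_firstOcc_le_of_occ (pvCells A k) i' (A.length - i') ((pvCells A k).getD x.toNat 0)
          x.toNat hmL (by omega) rfl
      rw [hrEq]
      by_contra hgt
      have hrj : j' < r := by omega
      have h2 := hQmax r hrj (by omega)
      have h1 := pv_count_win_eq_one (pvCells A k) ((pvCells A k).getD x.toNat 0) i' r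
        (by omega) (by omega) hr3 hr4
      rw [hr3] at h2
      omega
    · obtain ⟨-, hmem⟩ := PySem.List.le_foldl_max_int
        (PySem.List.pyRange ((i' : Nat) : Int) ((i' + (A.length - i') : Nat) : Int) 1)
        (fun idx => PySem.List.pyGetD F (PySem.List.pyGetD A idx 0) (-1)) ((i' : Nat) : Int)
      have hj'mem : ((j' : Nat) : Int)
          ∈ PySem.List.pyRange ((i' : Nat) : Int) ((i' + (A.length - i') : Nat) : Int) 1 :=
        PySem.List.mem_pyRange_one.mpr ⟨by exact_mod_cast hij, by omega⟩
      have hval := hmem _ hj'mem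
      rw [Fev j' hij (by omega)] at hval
      have hnoearly := pv_count_one_no_earlier (pvCells A k) ((pvCells A k).getD j' 0) i' j'
        hij (by omega) rfl hQ
      obtain ⟨r, hrEq, hr1, hr2, hr3, hr4⟩ :=
        pv_firstOcc_le_of_occ (pvCells A k) i' (A.length - i') ((pvCells A k).getD j' 0)
          j' hij (by omega) rfl
      have hrj : r = j' := by
        by_contra hne
        exact hnoearly r hr1 (by omega) hr3
      rw [hrEq, hrj] at hval
      exact hval
  rw [hfold]

-- ===== VERDICT (by name: the statement is the Claim_ definition above) =====
theorem find_min_range_colors_spec : Claim_equal_find_min_range_colors := by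
  intro A k hdom hpre
  unfold Spec_find_min_range_colors
  by_cases hA : A = []
  · subst hA
    show find_min_range_colors [] k = find_min_range_colors_alt [] k
    unfold find_min_range_colors find_min_range_colors_alt
    rw [pvOuterA]
    norm_num
  · obtain ⟨i', j', hval, hij, hjn, hP, hPmin, hQ, hQmax⟩ := pv_outerA_spec A k hpre hA
    rw [hval, pv_altB_spec A k hpre hA i' j' (by
      have := List.length_pos_iff.mpr hA
      omega) hij hjn hP hPmin hQ hQmax]
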